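-- pv_equiv track=rewrite | github.com/PopularAtacarejo/UltraRHATT | cadastro_funcionarios_api.py | _serialize_setores
-- ===== SOURCE A (Python) =====
-- MAX_SETORES_POR_LIDER = 10
--
-- def _serialize_setores(values: list) -> list:
--     sanitized = [item.strip() for item in values if item and item.strip()]
--     unique = []
--     for item in sanitized:
--         normalized = item.capitalize()
--         if normalized not in unique:
--             unique.append(normalized)
--         if len(unique) >= MAX_SETORES_POR_LIDER:
--             break
--     return unique
-- ===== SOURCE B (Python) =====
-- MAX_SETORES_POR_LIDER = 10
--
-- def _serialize_setores(values: list) -> list: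
--     normalized = [item.strip().capitalize() for item in values if item and item.strip()]
--
--     def go(items, budget):
--         # take the head, delete every later copy of it from the remainder, recurse
--         if budget == 0 or not items:
--             return []
--         head = items[0]
--         return [head] + go([x for x in items[1:] if x != head], budget - 1)
--
--     return go(normalized, MAX_SETORES_POR_LIDER)
-- ===== Notes on version B (the rewrite author's own statement) =====
-- stated objective: alternative
-- what changed: A's single-pass loop that tests each item against the accumulated unique list and breaks at 10 is replaced by a selection-style recursion: take the head, filter all its duplicates out of the remaining list, and recurse with a decreasing budget of 10 -- dedup by shrinking the input instead of growing and scanning an accumulator.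
import Mathlib
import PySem

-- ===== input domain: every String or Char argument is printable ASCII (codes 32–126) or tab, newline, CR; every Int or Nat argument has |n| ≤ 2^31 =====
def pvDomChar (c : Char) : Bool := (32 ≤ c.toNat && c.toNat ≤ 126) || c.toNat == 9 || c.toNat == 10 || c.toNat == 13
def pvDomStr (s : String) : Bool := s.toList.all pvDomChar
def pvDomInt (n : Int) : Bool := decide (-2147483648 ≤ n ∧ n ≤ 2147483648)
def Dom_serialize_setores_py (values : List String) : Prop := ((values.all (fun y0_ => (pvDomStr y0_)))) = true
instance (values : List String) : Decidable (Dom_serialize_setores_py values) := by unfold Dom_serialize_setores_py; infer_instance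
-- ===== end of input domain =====

-- B replaces A's accumulator scan with early break by a selection-style recursion
-- (take the head, filter its duplicates from the rest, recurse with budget 10); same result.

-- str.capitalize() for ASCII strings: first char uppercased, rest lowercased (exact on the ASCII domain)
def pyCapitalize (s : String) : String :=
  match s.toList with
  | [] => s
  | c :: cs => String.ofList (PySem.Chars.upperChar c :: PySem.Chars.lower cs)

-- the truthiness filter 'if item and item.strip()'
def pvKeep (item : String) : Bool := !(item == "") && !(PySem.Str.strip item == "")

-- ===== PORT A =====
-- the 'for item in sanitized: …' loop with its 'unique' accumulator and the break at 10
def pvALoop : List String → List String → List String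
  | [], unique => unique
  | item :: rest, unique =>
    let normalized := pyCapitalize item
    let unique' := if normalized ∈ unique then unique else unique ++ [normalized]
    if 10 ≤ unique'.length then unique' else pvALoop rest unique'

def serialize_setores_py (values : List String) : List String :=
  let sanitized := (values.filter pvKeep).map PySem.Str.strip
  pvALoop sanitized []

-- ===== PORT B =====
-- go(items, budget): head, then recurse on the tail with the head's duplicates filtered out
def pvBGo : List String → Nat → List String
  | _, 0 => []
  | [], _ + 1 => []
  | h :: t, b + 1 => h :: pvBGo (t.filter (· != h)) b

def serialize_setores_py_alt (values : List String) : List String :=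
  let normalized := (values.filter pvKeep).map (fun item => pyCapitalize (PySem.Str.strip item))
  pvBGo normalized 10

-- ===== PRECONDITION & SPEC =====
def Spec_serialize_setores_py (values : List String) (out : List String) : Prop := out = serialize_setores_py_alt values
instance (values : List String) (out : List String) : Decidable (Spec_serialize_setores_py values out) := by unfold Spec_serialize_setores_py; infer_instance

-- ===== CLAIM (what is proved, stated in full; the proofs are below) =====
def Claim_equal_serialize_setores_py : Prop := ∀ (values : List String), Dom_serialize_setores_py values → Spec_serialize_setores_py values (serialize_setores_py values)

-- ===== LEMMAS AND PROOFS =====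

-- a fold of Set.add only appends: the start is a prefix of the result
lemma foldl_add_prefix (l : List String) (s : List String) :
    ∃ t, l.foldl PySem.Set.add s = s ++ t := by
  induction l generalizing s with
  | nil => exact ⟨[], by simp⟩
  | cons x xs ih =>
    simp only [List.foldl_cons, PySem.Set.add_eq_ite]
    split_ifs with h
    · exact ih s
    · rcases ih (s ++ [x]) with ⟨t, ht⟩
      exact ⟨x :: t, by simpa using ht⟩

-- A's loop computes the take-10 of the Set.add fold of the capitalized items
lemma aLoop_eq (l : List String) (u : List String) (hu : u.length < 10) :
    pvALoop l u = ((l.map pyCapitalize).foldl PySem.Set.add u).take 10 := by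
  induction l generalizing u with
  | nil =>
    simp [pvALoop, List.take_of_length_le (Nat.le_of_lt hu)]
  | cons item rest ih =>
    simp only [pvALoop, List.map_cons, List.foldl_cons]
    rw [show (if pyCapitalize item ∈ u then u else u ++ [pyCapitalize item])
          = PySem.Set.add u (pyCapitalize item) from (PySem.Set.add_eq_ite u _).symm]
    set u' := PySem.Set.add u (pyCapitalize item) with hu'
    have hlen : u'.length ≤ u.length + 1 := by
      rw [hu', PySem.Set.add_eq_ite]; split_ifs <;> simp
    split_ifs with h
    · -- break: u'.length = 10
      have h10 : u'.length = 10 := le_antisymm (by omega) h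
      rcases foldl_add_prefix (rest.map pyCapitalize) u' with ⟨t, ht⟩
      rw [ht, List.take_append_of_le_length (by omega), List.take_of_length_le (by omega)]
    · exact ih u' (by omega)

-- items already in the accumulator may be filtered out of the fold
lemma foldl_add_filter_mem (t : List String) (s : List String) (h : String) (hs : h ∈ s) :
    t.foldl PySem.Set.add s = (t.filter (· != h)).foldl PySem.Set.add s := by
  induction t generalizing s with
  | nil => rfl
  | cons x xs ih =>
    by_cases hx : x = h
    · subst hx
      have : PySem.Set.add s x = s := by rw [PySem.Set.add_eq_ite, if_pos hs]
      simp [this, ih s hs]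
    · have hmem : h ∈ PySem.Set.add s x := by
        rw [PySem.Set.add_eq_ite]; split_ifs <;> simp [hs]
      simp [bne_iff_ne, hx, ih _ hmem]

-- an accumulator head no element of t equals stays in front of the fold
lemma foldl_add_cons (t : List String) (s : List String) (a : String)
    (ha : ∀ x ∈ t, x ≠ a) :
    t.foldl PySem.Set.add (a :: s) = a :: t.foldl PySem.Set.add s := by
  induction t generalizing s with
  | nil => rfl
  | cons x xs ih =>
    have hxa : x ≠ a := ha x (by simp)
    have hstep : PySem.Set.add (a :: s) x = a :: PySem.Set.add s x := by
      simp only [PySem.Set.add_eq_ite, List.mem_cons]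
      split_ifs with h1 h2 h2
      · rfl
      · rcases h1 with h1 | h1
        · exact absurd h1 hxa
        · exact absurd h1 h2
      · exact absurd (Or.inr h2) h1
      · rfl
    simp only [List.foldl_cons, hstep, ih _ (fun y hy => ha y (by simp [hy]))]

-- the key dedup identity: first-occurrence dedup of h::t is h followed by dedup of t without h
lemma foldl_add_nil_cons (h : String) (t : List String) :
    (h :: t).foldl PySem.Set.add [] = h :: (t.filter (· != h)).foldl PySem.Set.add [] := by
  have h1 : (h :: t).foldl PySem.Set.add [] = t.foldl PySem.Set.add [h] := by
    simp
  rw [h1, foldl_add_filter_mem t [h] h (by simp),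
      foldl_add_cons _ [] h (fun x hx => by
        simp only [List.mem_filter, bne_iff_ne] at hx; exact hx.2)]

-- B's recursion computes the take-b of the Set.add fold
lemma bGo_eq (b : Nat) (l : List String) :
    pvBGo l b = (l.foldl PySem.Set.add []).take b := by
  induction b generalizing l with
  | zero => simp [pvBGo]
  | succ b ih =>
    cases l with
    | nil => simp [pvBGo]
    | cons h t =>
      rw [show pvBGo (h :: t) (b + 1) = h :: pvBGo (t.filter (· != h)) b from rfl,
          ih, foldl_add_nil_cons, List.take_succ_cons]

-- ===== VERDICT (by name: the statement is the Claim_ definition above) =====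
theorem serialize_setores_py_spec : Claim_equal_serialize_setores_py := by
  intro values _
  show serialize_setores_py values = serialize_setores_py_alt values
  simp only [serialize_setores_py, serialize_setores_py_alt]
  rw [aLoop_eq _ _ (by simp), bGo_eq]
  simp [List.map_map, Function.comp_def]
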